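-- pv_equiv track=rewrite | github.com/Hakyoungan/pps | week3/A046_안하경_20240716.py | solution
-- ===== SOURCE A (Python) =====
-- def solution(players):
--     first_letter_count = {}
--
--     for player in players:
--         first_letter = player[0]
--         if first_letter in first_letter_count:
--             first_letter_count[first_letter] += 1
--         else:
--             first_letter_count[first_letter] = 1
--
--     starters = [letter for letter, count in first_letter_count.items() if count >= 5]
--
--     if starters:
--         return ''.join(sorted(starters))
--     else:
--         return "PREDAJA"
-- ===== SOURCE B (Python) =====
-- def solution(players):
--     firsts = sorted(player[0] for player in players)
--     letters = []
--     i, n = 0, len(firsts)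
--     while i < n:
--         j = i
--         while j < n and firsts[j] == firsts[i]:
--             j += 1
--         if j - i >= 5:
--             letters.append(firsts[i])
--         i = j
--     return ''.join(letters) if letters else "PREDAJA"
-- ===== Notes on version B (the rewrite author's own statement) =====
-- stated objective: alternative
-- what changed: Replaces the dict-based letter counting plus final sort of qualifying letters by sort-first-letters-then-scan-runs: the sorted first letters are traversed once, each maximal run's length is compared with 5, so the qualifying letters come out already in sorted order and no dictionary is built.
-- outside the precondition, e.g. on solution(['', 'abc']): A raises IndexError, B raises IndexError
import Mathlib
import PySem

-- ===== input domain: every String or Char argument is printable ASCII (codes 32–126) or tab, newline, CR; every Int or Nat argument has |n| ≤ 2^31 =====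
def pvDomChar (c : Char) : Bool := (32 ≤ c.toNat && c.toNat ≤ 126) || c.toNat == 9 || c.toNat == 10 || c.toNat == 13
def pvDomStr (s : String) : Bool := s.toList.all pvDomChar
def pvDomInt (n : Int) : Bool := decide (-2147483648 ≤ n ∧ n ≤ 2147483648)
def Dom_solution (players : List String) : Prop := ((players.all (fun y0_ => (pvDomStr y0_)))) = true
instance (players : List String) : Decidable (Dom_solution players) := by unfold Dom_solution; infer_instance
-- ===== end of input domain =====

-- B replaces the dict counting + final sort by sort-the-first-letters-then-scan-runs (alternative decomposition, same result).

-- ===== PORT A =====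
-- player[0]; total stand-in: Pre_solution excludes the empty strings on which Python raises IndexError
def pyFirst (player : String) : Char := (PySem.Str.pyGet? player 0).getD ' '

def solution (players : List String) : String :=
  let d : PySem.Dict Char Int :=
    players.foldl (fun d player =>
      let c := pyFirst player
      if d.contains c then d.modify c 0 (· + 1) else d.insert c 1) PySem.Dict.empty
  let starters : List Char := (d.items.filter (fun kv => decide (5 ≤ kv.2))).map (fun kv => kv.1)
  if !starters.isEmpty then String.ofList (PySem.List.sorted starters (fun c => c) false)
  else "PREDAJA"

-- ===== PORT B =====
-- the two nested while loops of Source B: walk the sorted letters one maximal run at a time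
def runScan : List Char → List Char
  | [] => []
  | c :: rest =>
      let k := (rest.takeWhile (fun x => x == c)).length + 1
      let rest' := rest.dropWhile (fun x => x == c)
      if 5 ≤ k then c :: runScan rest' else runScan rest'
  termination_by l => l.length
  decreasing_by all_goals
    exact Nat.lt_succ_of_le (List.Sublist.length_le (List.dropWhile_sublist _))

def solution_alt (players : List String) : String :=
  let firsts := PySem.List.sorted (players.map pyFirst) (fun c => c) false
  let letters := runScan firsts
  if !letters.isEmpty then String.ofList letters else "PREDAJA"

-- ===== PRECONDITION & SPEC =====
-- Pre_ excludes lists containing an empty string: there Python A raises IndexError on player[0].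
def Pre_solution (players : List String) : Prop := ∀ p ∈ players, p ≠ ""
instance (players : List String) : Decidable (Pre_solution players) := by unfold Pre_solution; infer_instance
def pvWitness_solution : List String := ["ab", "ax", "a1", "a2", "a3", "b!"]

def Spec_solution (players : List String) (out : String) : Prop := out = solution_alt players
instance (players : List String) (out : String) : Decidable (Spec_solution players out) := by unfold Spec_solution; infer_instance

-- ===== CLAIM (what is proved, stated in full; the proofs are below) =====
def Claim_equal_solution : Prop := ∀ (players : List String), Dom_solution players → Pre_solution players → Spec_solution players (solution players)

-- ===== LEMMAS AND PROOFS =====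

-- A's loop body is exactly `d[c] = d.get(c,0)+1`
lemma branch_eq (d : PySem.Dict Char Int) (c : Char) :
    (if d.contains c then d.modify c 0 (· + 1) else d.insert c 1) = d.modify c 0 (· + 1) := by
  by_cases h : d.contains c
  · simp [h]
  · have h0 : d.getD c 0 = 0 := PySem.Dict.getD_of_not_contains (d := d) (d0 := 0) (by simpa using h)
    simp [h, PySem.Dict.modify, h0]

-- Set.ofList is a sublist of its argument
lemma foldl_add_sublist (l s : List Char) : List.Sublist (List.foldl PySem.Set.add s l) (s ++ l) := by
  induction l generalizing s with
  | nil => simp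
  | cons x t ih =>
      refine (ih (PySem.Set.add s x)).trans ?_
      have : List.Sublist (PySem.Set.add s x ++ t) (s ++ x :: t) := by
        simp only [PySem.Set.add, PySem.Set.contains]
        split_ifs
        · exact (List.append_sublist_append_left s).2 (List.sublist_cons_self x t)
        · simp [List.append_assoc]
      exact this
  
lemma ofList_sublist (l : List Char) : List.Sublist (PySem.Set.ofList l) l := by
  simpa using foldl_add_sublist l []

lemma foldl_add_cons (c : Char) (r : List Char) (hc : c ∉ r) (s : List Char) :
    List.foldl PySem.Set.add (c :: s) r = c :: List.foldl PySem.Set.add s r := by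
  induction r generalizing s with
  | nil => rfl
  | cons x t ih =>
      have hxc : x ≠ c := fun h => hc (h ▸ List.mem_cons_self)
      have hct : c ∉ t := fun h => hc (List.mem_cons_of_mem _ h)
      have : PySem.Set.add (c :: s) x = c :: PySem.Set.add s x := by
        simp only [PySem.Set.add, PySem.Set.contains]
        split_ifs with h1 h2 <;> simp_all
      rw [List.foldl_cons, this, List.foldl_cons, ih hct]

lemma foldl_add_const (t s : List Char) (c : Char) (ht : ∀ x ∈ t, x = c) (hs : c ∈ s) :
    List.foldl PySem.Set.add s t = s := by
  induction t with
  | nil => rfl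
  | cons x u ih =>
      have : x = c := ht x List.mem_cons_self
      subst this
      have : PySem.Set.add s x = s := by
        simp [PySem.Set.add, PySem.Set.contains, hs]
      rw [List.foldl_cons, this, ih (fun y hy => ht y (List.mem_cons_of_mem _ hy))]

lemma ofList_run (c : Char) (t r : List Char) (ht : ∀ x ∈ t, x = c) (hr : c ∉ r) :
    PySem.Set.ofList (c :: (t ++ r)) = c :: PySem.Set.ofList r := by
  have h1 : PySem.Set.ofList (c :: (t ++ r)) = List.foldl PySem.Set.add [c] (t ++ r) := by
    simp [PySem.Set.ofList, PySem.Set.add, PySem.Set.empty, PySem.Set.contains]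
  rw [h1, List.foldl_append, foldl_add_const t [c] c ht (List.mem_singleton.2 rfl),
    foldl_add_cons c r hr []]
  rfl

-- c does not survive its own run in a sorted list
lemma not_mem_dropWhile (c : Char) (l : List Char)
    (h1 : ∀ x ∈ l, c ≤ x) (h2 : l.Pairwise (· ≤ ·)) :
    c ∉ l.dropWhile (fun x => x == c) := by
  induction l with
  | nil => simp
  | cons x t ih =>
      by_cases hx : x = c
      · subst hx
        rw [List.dropWhile_cons_of_pos (by simp)]
        exact ih (fun y hy => h1 y (List.mem_cons_of_mem _ hy)) h2.tail
      · rw [List.dropWhile_cons_of_neg (by simp [hx])]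
        intro hmem
        rcases List.mem_cons.1 hmem with h | h
        · exact hx h.symm
        · have hxc : c < x := lt_of_le_of_ne (h1 x List.mem_cons_self) (Ne.symm hx)
          have : x ≤ c := (List.pairwise_cons.1 h2).1 c h
          exact absurd (lt_of_lt_of_le hxc this) (lt_irrefl c)

-- runScan on a sorted list = the distinct letters (in order) whose multiplicity is ≥ 5
lemma runScan_eq_aux : ∀ (n : Nat) (l : List Char), l.length ≤ n → l.Pairwise (· ≤ ·) →
    runScan l = (PySem.Set.ofList l).filter (fun c => decide (5 ≤ l.count c)) := by
  intro n
  induction n with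
  | zero =>
      intro l hl _
      have : l = [] := List.eq_nil_of_length_eq_zero (Nat.le_zero.1 hl)
      subst this
      simp [runScan, PySem.Set.ofList, PySem.Set.empty]
  | succ n ih =>
      intro l hl hp
      match l with
      | [] => simp [runScan, PySem.Set.ofList, PySem.Set.empty]
      | c :: rest =>
        have h1 : ∀ x ∈ rest, c ≤ x := fun x hx => (List.pairwise_cons.1 hp).1 x hx
        have h2 : rest.Pairwise (· ≤ ·) := (List.pairwise_cons.1 hp).2
        set t := rest.takeWhile (fun x => x == c) with htdef
        set r := rest.dropWhile (fun x => x == c) with hrdef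
        have htr : t ++ r = rest := List.takeWhile_append_dropWhile
        have ht : ∀ x ∈ t, x = c := by
          intro x hx
          have := List.mem_takeWhile_imp hx
          simpa using this
        have hr : c ∉ r := not_mem_dropWhile c rest h1 h2
        have hrp : r.Pairwise (· ≤ ·) :=
          List.Pairwise.sublist (List.dropWhile_sublist _) h2
        have hlen : r.length ≤ n := by
          have := congrArg List.length htr
          simp only [List.length_append, List.length_cons] at this hl
          omega
        have ihr := ih r hlen hrp
        have hcnt : (c :: rest).count c = t.length + 1 := by
          rw [← htr]
          have hct : t.count c = t.length := List.count_eq_length.2 (fun x hx => ((ht x hx).symm ▸ rfl))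
          have hcr : r.count c = 0 := List.count_eq_zero.2 hr
          simp [List.count_append, hct, hcr]
        have hofl : PySem.Set.ofList (c :: rest) = c :: PySem.Set.ofList r := by
          rw [← htr]; exact ofList_run c t r ht hr
        have hcnt2 : ∀ d ∈ PySem.Set.ofList r, (c :: rest).count d = r.count d := by
          intro d hd
          have hdr : d ∈ r := (PySem.Set.mem_ofList r d).1 hd
          have hdc : d ≠ c := fun e => hr (e ▸ hdr)
          have hdt : t.count d = 0 := List.count_eq_zero.2 (fun hmem => hdc (ht d hmem))
          have hdc' : ¬ c = d := fun h => hdc h.symm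
          rw [← htr]
          simp [List.count_append, hdt, hdc']
        have key : runScan (c :: rest) = if 5 ≤ t.length + 1 then c :: runScan r else runScan r := by
          rw [runScan]
        have hfilter : (PySem.Set.ofList r).filter (fun d => decide (5 ≤ (c :: rest).count d))
            = (PySem.Set.ofList r).filter (fun d => decide (5 ≤ r.count d)) := by
          apply List.filter_congr
          intro d hd
          rw [hcnt2 d hd]
        rw [key, hofl, List.filter_cons, hcnt, hfilter, ihr]
        by_cases h5 : 5 ≤ t.length + 1 <;> simp [h5]

lemma runScan_eq (l : List Char) (h : l.Pairwise (· ≤ ·)) :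
    runScan l = (PySem.Set.ofList l).filter (fun c => decide (5 ≤ l.count c)) :=
  runScan_eq_aux l.length l le_rfl h

-- the central equality: both ports return the same string on every input
lemma sol_eq (players : List String) : solution players = solution_alt players := by
  show (if !(((players.foldl (fun d player =>
          let c := pyFirst player
          if d.contains c then d.modify c 0 (· + 1) else d.insert c 1) (PySem.Dict.empty : PySem.Dict Char Int)).items.filter
            (fun kv => decide (5 ≤ kv.2))).map (fun kv : Char × Int => kv.1)).isEmpty
        then String.ofList (PySem.List.sorted (((players.foldl (fun d player =>
          let c := pyFirst player
          if d.contains c then d.modify c 0 (· + 1) else d.insert c 1) (PySem.Dict.empty : PySem.Dict Char Int)).items.filter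
            (fun kv => decide (5 ≤ kv.2))).map (fun kv => kv.1)) (fun c => c) false)
        else "PREDAJA")
      = (if !(runScan (PySem.List.sorted (players.map pyFirst) (fun c => c) false)).isEmpty
        then String.ofList (runScan (PySem.List.sorted (players.map pyFirst) (fun c => c) false))
        else "PREDAJA")
  have hfold : (players.foldl (fun d player =>
      let c := pyFirst player
      if d.contains c then d.modify c 0 (· + 1) else d.insert c 1) PySem.Dict.empty)
      = PySem.Dict.counter (players.map pyFirst) := by
    rw [PySem.Dict.counter_eq_foldl, List.foldl_map]
    apply PySem.List.foldl_congr_mem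
    intro acc x _
    exact branch_eq acc (pyFirst x)
  have hstart : (((PySem.Dict.counter (players.map pyFirst)).items.filter
        (fun kv => decide (5 ≤ kv.2))).map (fun kv => kv.1))
      = (PySem.Set.ofList (players.map pyFirst)).filter
        (fun k => decide (5 ≤ (players.map pyFirst).count k)) := by
    rw [PySem.Dict.items_counter, List.filter_map, List.map_map]
    have hpred : ((fun kv : Char × Int => decide (5 ≤ kv.2)) ∘
          fun k => (k, ((players.map pyFirst).count k : Int)))
        = fun k => decide (5 ≤ (players.map pyFirst).count k) := by
      funext k
      simp only [Function.comp]
      exact decide_eq_decide.2 (by exact_mod_cast Iff.rfl)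
    have hfst : ((fun kv : Char × Int => kv.1) ∘
          fun k => (k, ((players.map pyFirst).count k : Int))) = id := rfl
    rw [hpred, hfst, List.map_id]
  rw [hfold, hstart]
  set fs := players.map pyFirst with hfs
  set S := PySem.List.sorted fs (fun c => c) false with hSdef
  have hperm : S.Perm fs := PySem.List.sorted_perm fs _ false
  have hS : S.Pairwise (· ≤ ·) := PySem.List.sorted_pairwise fs (fun c => c)
  have hlet : runScan S = (PySem.Set.ofList S).filter (fun k => decide (5 ≤ fs.count k)) := by
    rw [runScan_eq S hS]
    exact List.filter_congr (fun d _ => by rw [hperm.count_eq])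
  set SA := (PySem.Set.ofList fs).filter (fun k => decide (5 ≤ fs.count k)) with hSA
  set SB := (PySem.Set.ofList S).filter (fun k => decide (5 ≤ fs.count k)) with hSB
  have hsetperm : (PySem.Set.ofList S).Perm (PySem.Set.ofList fs) := by
    apply List.perm_of_nodup_nodup_toFinset_eq (PySem.Set.nodup_ofList S) (PySem.Set.nodup_ofList fs)
    apply Finset.ext
    intro a
    simp [List.mem_toFinset, PySem.Set.mem_ofList, hperm.mem_iff]
  have hTperm : SB.Perm SA := hsetperm.filter _
  have hlt : SB.Pairwise (· < ·) := by
    have hsub : List.Sublist SB S := List.Sublist.trans List.filter_sublist (ofList_sublist S)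
    have hle := List.Pairwise.sublist hsub hS
    have hnd : SB.Nodup := (PySem.Set.nodup_ofList S).filter _
    exact (hle.and hnd).imp (fun h => lt_of_le_of_ne h.1 h.2)
  have hsorted : PySem.List.sorted SA (fun c => c) false = SB :=
    PySem.List.sorted_eq_of_perm_of_pairwise_lt _ _ _ hTperm hlt
  rw [hlet, hsorted]
  clear_value SB
  clear_value SA
  clear hsorted hlet hSA hSB
  cases SA with
  | nil =>
      rw [hTperm.eq_nil]
  | cons a as =>
      cases SB with
      | nil => exact (List.cons_ne_nil a as hTperm.symm.eq_nil).elim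
      | cons b bs => rfl

-- ===== VERDICT (by name: the statement is the Claim_ definition above) =====
theorem solution_spec : Claim_equal_solution := by
  intro players _ _
  exact sol_eq players
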